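-- pv_equiv track=rewrite | github.com/nawaf107194/noogh-unified-system | neural_engine/creative_writing.py | _parse_chapters
-- ===== SOURCE A (Python) =====
-- from typing import Any, Dict, List
--
-- def _parse_chapters(content: str) -> List[str]:
--     """Parse story into chapters"""
--     chapters = []
--     current_chapter = []
--
--     for line in content.split("\n"):
--         if line.startswith("#"):
--             if current_chapter:
--                 chapters.append("\n".join(current_chapter))
--             current_chapter = [line]
--         else:
--             current_chapter.append(line)
--
--     if current_chapter:
--         chapters.append("\n".join(current_chapter))
--
--     return chapters if chapters else [content]
-- ===== SOURCE B (Python) =====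
-- def _parse_chapters(content: str):
--     """Parse story into chapters (recursive segmentation: each segment runs
--     from its first line to just before the next heading line)."""
--     def segs(lines):
--         if not lines:
--             return []
--         # scan for the next heading strictly after the segment's first line
--         k = 1
--         while k < len(lines) and not lines[k].startswith("#"):
--             k += 1
--         return ["\n".join(lines[:k])] + segs(lines[k:])
--     return segs(content.split("\n"))
-- ===== Notes on version B (the rewrite author's own statement) =====
-- stated objective: alternative
-- what changed: Replaces A's single accumulator loop (chapters + current_chapter lists with a post-loop flush and an unreachable [content] fallback) by a recursive segmentation: each call scans to the next heading line and emits lines[:k] as one chapter.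
import Mathlib
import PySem

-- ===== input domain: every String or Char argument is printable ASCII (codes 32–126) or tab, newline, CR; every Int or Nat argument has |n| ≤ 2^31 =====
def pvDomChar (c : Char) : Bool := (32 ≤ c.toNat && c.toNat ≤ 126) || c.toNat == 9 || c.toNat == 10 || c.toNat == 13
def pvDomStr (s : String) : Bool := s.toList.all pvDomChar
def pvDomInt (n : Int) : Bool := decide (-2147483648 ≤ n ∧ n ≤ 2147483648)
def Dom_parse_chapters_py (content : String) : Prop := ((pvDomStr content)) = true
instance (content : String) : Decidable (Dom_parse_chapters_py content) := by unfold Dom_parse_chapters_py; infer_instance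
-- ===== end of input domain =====

-- B replaces A's accumulator loop by a recursive segmentation at heading lines; same cost, different decomposition.

-- ===== PORT A =====
-- one loop iteration of A: flush current chapter at a heading, else extend it
def pvStepA (st : List String × List String) (line : String) : List String × List String :=
  if PySem.Str.startswith line "#" then
    ((if st.2 ≠ [] then st.1 ++ [PySem.Str.join "\n" st.2] else st.1), [line])
  else
    (st.1, st.2 ++ [line])

-- the post-loop flush of A ("if current_chapter: chapters.append(...)")
def pvFinalA (st : List String × List String) : List String :=
  if st.2 ≠ [] then st.1 ++ [PySem.Str.join "\n" st.2] else st.1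

def parse_chapters_py (content : String) : List String :=
  if pvFinalA (((PySem.Str.split? content "\n").getD []).foldl pvStepA ([], [])) = [] then [content]
  else pvFinalA (((PySem.Str.split? content "\n").getD []).foldl pvStepA ([], []))

-- ===== PORT B =====
def pvNotHead (s : String) : Bool := !(PySem.Str.startswith s "#")

-- Source B's segs: the inner while-loop scan to the next heading is lines[1:].takeWhile/dropWhile
def pvSegs : List String → List String
  | [] => []
  | l :: rest =>
    PySem.Str.join "\n" (l :: rest.takeWhile pvNotHead) :: pvSegs (rest.dropWhile pvNotHead)
termination_by lines => lines.length
decreasing_by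
  simpa using Nat.lt_succ_of_le (List.length_dropWhile_le pvNotHead rest)

def parse_chapters_py_alt (content : String) : List String :=
  pvSegs ((PySem.Str.split? content "\n").getD [])

-- ===== PRECONDITION & SPEC =====
def Spec_parse_chapters_py (content : String) (out : List String) : Prop := out = parse_chapters_py_alt content
instance (content : String) (out : List String) : Decidable (Spec_parse_chapters_py content out) := by unfold Spec_parse_chapters_py; infer_instance

-- ===== CLAIM (what is proved, stated in full; the proofs are below) =====
def Claim_equal_parse_chapters_py : Prop := ∀ (content : String), Dom_parse_chapters_py content → Spec_parse_chapters_py content (parse_chapters_py content)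

-- ===== LEMMAS AND PROOFS =====

-- str.split never returns an empty list
lemma pvSplitOnGo_ne_nil : ∀ (fuel : Nat) (sep l cur : List Char) (acc : List (List Char)),
    PySem.Chars.splitOn.go sep fuel l cur acc ≠ [] := by
  intro fuel
  induction fuel with
  | zero => intro sep l cur acc; simp [PySem.Chars.splitOn.go]
  | succ n ih =>
    intro sep l cur acc
    cases l with
    | nil => simp [PySem.Chars.splitOn.go]
    | cons c rest =>
      rw [PySem.Chars.splitOn.go]
      split_ifs with h
      · exact ih _ _ _ _
      · exact ih _ _ _ _

lemma pvLines_ne_nil (content : String) :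
    (PySem.Str.split? content "\n").getD [] ≠ [] := by
  simp only [PySem.Str.split?, PySem.Chars.split?]
  simp only [List.isEmpty_iff]
  rw [if_neg (by decide)]
  simp only [Option.map_some, Option.getD_some, ne_eq, List.map_eq_nil_iff]
  exact fun h => pvSplitOnGo_ne_nil _ _ _ _ _ (by
    simpa [PySem.Chars.splitOn] using h)

-- loop invariant: once the current chapter is nonempty, A's remaining run
-- produces exactly B's segmentation of the remaining lines glued onto it
lemma pvInv : ∀ (lines ch cur : List String), cur ≠ [] →
    pvFinalA (lines.foldl pvStepA (ch, cur)) =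
      ch ++ (PySem.Str.join "\n" (cur ++ lines.takeWhile pvNotHead)
              :: pvSegs (lines.dropWhile pvNotHead)) := by
  intro lines
  induction lines with
  | nil =>
    intro ch cur h
    simp [pvFinalA, pvSegs, h]
  | cons line rest ih =>
    intro ch cur h
    have htl : "#".toList = ['#'] := by decide
    by_cases hl : PySem.Str.startswith line "#"
    · have hc : PySem.Chars.startswith line.toList ['#'] = true := by
        simpa [PySem.Str.startswith, htl] using hl
      have hstep : pvStepA (ch, cur) line = (ch ++ [PySem.Str.join "\n" cur], [line]) := by
        simp [pvStepA, h, hc]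
      rw [List.foldl_cons, hstep, ih _ _ (by simp)]
      simp [pvNotHead, hc, pvSegs]
    · have hc : PySem.Chars.startswith line.toList ['#'] = false := by
        simpa [PySem.Str.startswith, htl] using hl
      have hstep : pvStepA (ch, cur) line = (ch, cur ++ [line]) := by
        simp [pvStepA, hc]
      rw [List.foldl_cons, hstep, ih _ _ (by simp [h])]
      simp [pvNotHead, hc]

-- ===== VERDICT (by name: the statement is the Claim_ definition above) =====
theorem parse_chapters_py_spec : Claim_equal_parse_chapters_py := by
  intro content _
  unfold Spec_parse_chapters_py parse_chapters_py parse_chapters_py_alt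
  obtain ⟨l, rest, hl⟩ : ∃ l rest, (PySem.Str.split? content "\n").getD [] = l :: rest := by
    cases hE : (PySem.Str.split? content "\n").getD [] with
    | nil => exact absurd hE (pvLines_ne_nil content)
    | cons a b => exact ⟨a, b, rfl⟩
  rw [hl]
  have hfirst : pvStepA ([], []) l = ([], [l]) := by
    by_cases hs : PySem.Str.startswith l "#" <;> simp [pvStepA]
  have := pvInv rest [] [l] (by simp)
  rw [List.foldl_cons, hfirst, this]
  simp [pvSegs]
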